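-- pv_equiv track=rewrite | github.com/aractinm/DNA_binding_challenge | substring_kernel.py | find
-- ===== SOURCE A (Python) =====
-- def find(main, sub, weight):
-- 	i = 0
-- 	j = 0
-- 	start_ind = 0
-- 	stop_ind = 0
-- 	acc = 0
-- 	while i < len(main):
-- 		if main[i] == sub[j]:
-- 			if j == 0:
-- 				start_ind = i + 1
-- 				j += 1
-- 				i += 1
-- 			elif j == len(sub)-1:
-- 				stop_ind = i + 1
-- 				acc += weight**(stop_ind - start_ind + 1)
-- 				j = 0
-- 				i = start_ind
-- 			else:
-- 				j += 1
-- 				i +=1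
-- 		else:
-- 			i += 1
--
-- 	return(acc)
-- ===== SOURCE B (Python) =====
-- def _first_greater(lst, x):
--     # index of the first element of the ascending list lst that is > x
--     lo, hi = 0, len(lst)
--     while lo < hi:
--         mid = (lo + hi) // 2
--         if lst[mid] <= x:
--             lo = mid + 1
--         else:
--             hi = mid
--     return lo
--
--
-- def find(main, sub, weight):
--     if not sub:
--         return 0
--     # occ[c] = ascending list of positions of c in main
--     occ = {}
--     for i, ch in enumerate(main):
--         occ.setdefault(ch, []).append(i)
--     acc = 0
--     for s in occ.get(sub[0], []):
--         p = s
--         ok = True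
--         for c in sub[1:]:
--             lst = occ.get(c, [])
--             k = _first_greater(lst, p)
--             if k == len(lst):
--                 ok = False
--                 break
--             p = lst[k]
--         if not ok:
--             # the tail of sub is not a subsequence of main[s+1:]; it cannot be a
--             # subsequence of any shorter suffix either, so no later start completes
--             break
--         acc += weight ** (p - s + 1)
--     return acc
-- ===== Notes on version B (the rewrite author's own statement) =====
-- stated objective: alternative
-- what changed: B builds a per-character position index once and completes each pattern start by binary-search jumps over it (stopping for good when one completion fails, which implies all later ones fail), instead of A's character-by-character rescan that restarts the whole scan after every completed match.
-- intended difference: On single-character patterns whose only occurrence is the last character of main (with weight != 0), A returns 0 because it only adds to the accumulator when a second pattern character is matched, while B returns weight, the weighted count of that one occurrence, which is the intended kernel value. — e.g. on find("a", "a", 2): A returns 0, B returns 2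
import Mathlib
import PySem

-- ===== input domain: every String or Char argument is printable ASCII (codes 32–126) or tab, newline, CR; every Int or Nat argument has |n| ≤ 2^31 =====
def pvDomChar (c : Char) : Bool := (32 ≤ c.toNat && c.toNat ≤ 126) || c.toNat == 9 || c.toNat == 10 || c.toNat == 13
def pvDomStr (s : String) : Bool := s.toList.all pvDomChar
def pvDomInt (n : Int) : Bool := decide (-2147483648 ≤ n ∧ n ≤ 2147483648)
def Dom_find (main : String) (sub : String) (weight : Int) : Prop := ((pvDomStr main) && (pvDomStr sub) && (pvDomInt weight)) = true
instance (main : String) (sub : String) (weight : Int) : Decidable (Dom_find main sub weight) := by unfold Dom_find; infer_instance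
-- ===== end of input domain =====

-- B replaces A's restart-and-rescan matching with a per-character position index built
-- once, completing each pattern start by binary-search jumps over it (objective:
-- alternative — a genuinely different algorithm of comparable cost).

-- ===== PORT A =====
-- A's single while-loop has two phases (j == 0: searching for the next start of the
-- pattern; j ≥ 1: completing the current match), and the only backward jump of i goes
-- to the phase boundary (i = start_ind, j = 0).  The port transcribes the very same
-- state machine split at that boundary so each phase is a structural recursion on i:
-- innerA is the loop body for j ≥ 1 (returns some acc' when the 'j == len(sub)-1'
-- branch fires, i.e. Python continues at i = start_ind with j = 0; none when the loop
-- exits with i = len(main)), outerA is the loop body for j == 0.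
def innerA (cs ss : List Char) (w : Int) (start : Nat) (acc : Int) (i j : Nat) : Option Int :=
  if h : i < cs.length then
    if cs[i] = ss.getD j ' ' then      -- 'main[i] == sub[j]' (j < len(sub) whenever Python does not raise)
      if j = ss.length - 1 then some (acc + w ^ (i + 1 - start + 1))   -- stop_ind = i+1; acc += weight**(stop_ind-start_ind+1)
      else innerA cs ss w start acc (i + 1) (j + 1)
    else innerA cs ss w start acc (i + 1) j
  else none
termination_by cs.length - i

def outerA (cs ss : List Char) (w : Int) (acc : Int) (i : Nat) : Int :=
  if h : i < cs.length then
    if cs[i] = ss.getD 0 ' ' then      -- 'main[i] == sub[j]' with j == 0: start_ind = i+1, j = 1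
      match innerA cs ss w (i + 1) acc (i + 1) 1 with
      | some acc' => outerA cs ss w acc' (i + 1)   -- completed: i = start_ind, j = 0
      | none => acc                                -- i reached len(main): loop ends, return acc
    else outerA cs ss w acc (i + 1)
  else acc
termination_by cs.length - i

def find (main : String) (sub : String) (weight : Int) : Int :=
  outerA main.toList sub.toList weight 0 0

-- ===== PORT B =====
-- literal port of Source B.  List/dict lookups whose index/key is in range by construction
-- (lst[mid] inside the binary search, lst[k] after the k == len(lst) test, occ[c] built
-- for every character of main) are ported with getD; the int exponent p - s + 1 is
-- positive whenever it is reached, so weight ** (p - s + 1) is ported as ^ (…).toNat.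
def firstGreater (lst : List Int) (x : Int) (lo hi : Nat) : Nat :=
  if h : lo < hi then
    if lst.getD ((lo + hi) / 2) 0 ≤ x then firstGreater lst x ((lo + hi) / 2 + 1) hi
    else firstGreater lst x lo ((lo + hi) / 2)
  else lo
termination_by hi - lo
decreasing_by all_goals omega

def find_alt (main : String) (sub : String) (weight : Int) : Int :=
  if sub = "" then 0
  else
    let cs := main.toList
    let ss := sub.toList
    let occ : PySem.Dict Char (List Int) :=                         -- occ.setdefault(ch, []).append(i)
      (PySem.List.enumerate cs).foldl
        (fun d p => d.modify p.2 [] (· ++ [p.1])) PySem.Dict.empty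
    let res := (occ.getD (ss.getD 0 ' ') []).foldl                  -- for s in occ.get(sub[0], []), with break
      (fun (st : Int × Bool) s =>
        if st.2 then
          let r := (ss.drop 1).foldl                                -- for c in sub[1:], with break
            (fun (pq : Int × Bool) c =>
              if pq.2 then
                let lst := occ.getD c []
                let k := firstGreater lst pq.1 0 lst.length
                if k = lst.length then (pq.1, false)                -- ok = False; break
                else (lst.getD k 0, true)                           -- p = lst[k]
              else pq)
            (s, true)
          if r.2 then (st.1 + weight ^ (r.1 - s + 1).toNat, true)   -- acc += weight ** (p - s + 1)
          else (st.1, false)                                        -- break out of the outer loop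
        else st)
      (0, true)
    res.1

-- ===== PRECONDITION & SPEC =====
-- Pre_ excludes exactly the inputs on which A raises IndexError: after matching the
-- first pattern character A unconditionally indexes sub[j] with j = 1 at the next loop
-- iteration, so an empty sub (with main nonempty) or a length-1 sub whose character
-- occurs before the last position of main crashes A.
def Pre_find (main : String) (sub : String) (weight : Int) : Prop :=
  2 ≤ sub.toList.length ∨ (sub = "" ∧ main = "") ∨
    (sub.toList.length = 1 ∧ main.toList.dropLast.all (fun c => !sub.toList.contains c) = true)
instance (main : String) (sub : String) (weight : Int) : Decidable (Pre_find main sub weight) := by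
  unfold Pre_find; infer_instance

def pvWitness_find : String × String × Int := ("abab", "ab", 2)

-- On single-character patterns whose only occurrence is the last character of main (and
-- weight ≠ 0), A returns 0 — it only ever adds to acc when a second pattern character is
-- matched — while B returns weight, the weighted count of that one occurrence, which is
-- the intended kernel value.
def D_find (main : String) (sub : String) (weight : Int) : Prop :=
  sub.toList.length = 1 ∧ main.toList.getLast? = sub.toList.head? ∧ weight ≠ 0
instance (main : String) (sub : String) (weight : Int) : Decidable (D_find main sub weight) := by
  unfold D_find; infer_instance

def Spec_find (main : String) (sub : String) (weight : Int) (out : Int) : Prop :=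
  ¬ D_find main sub weight → out = find_alt main sub weight
instance (main : String) (sub : String) (weight : Int) (out : Int) : Decidable (Spec_find main sub weight out) := by
  unfold Spec_find; infer_instance

def pvDiffWitness_find : String × String × Int := ("a", "a", 2)
def pvDiffWitnessOut_find : Int × Int := (0, 2)

-- ===== CLAIM (what is proved, stated in full; the proofs are below) =====
def Claim_unchanged_find : Prop := ∀ (main : String) (sub : String) (weight : Int), Dom_find main sub weight → Pre_find main sub weight → Spec_find main sub weight (find main sub weight)
def Claim_changed_find : Prop := Dom_find (pvDiffWitness_find.1) (pvDiffWitness_find.2.1) (pvDiffWitness_find.2.2) ∧ Pre_find (pvDiffWitness_find.1) (pvDiffWitness_find.2.1) (pvDiffWitness_find.2.2) ∧ D_find (pvDiffWitness_find.1) (pvDiffWitness_find.2.1) (pvDiffWitness_find.2.2) ∧ find (pvDiffWitness_find.1) (pvDiffWitness_find.2.1) (pvDiffWitness_find.2.2) = pvDiffWitnessOut_find.1 ∧ find_alt (pvDiffWitness_find.1) (pvDiffWitness_find.2.1) (pvDiffWitness_find.2.2) = pvDiffWitnessOut_find.2 ∧ pvDiffWitnessOut_find.1 ≠ pvDiffW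itnessOut_find.2
def Claim_exact_find : Prop := ∀ (main : String) (sub : String) (weight : Int), Dom_find main sub weight → Pre_find main sub weight → D_find main sub weight → find main sub weight ≠ find_alt main sub weight

-- ===== LEMMAS AND PROOFS =====

-- nxt cs c p: the smallest q ≥ p with cs[q] = c, or cs.length if there is none.
def nxt (cs : List Char) (c : Char) (p : Nat) : Nat :=
  if h : p < cs.length then (if cs[p] = c then p else nxt cs c (p + 1)) else cs.length
termination_by cs.length - p

-- gEnd cs cc pos: the final index of the greedy earliest match of cc in cs starting
-- strictly after pos (none if cc is not a subsequence of cs after pos).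
def gEnd (cs : List Char) (cc : List Char) (pos : Nat) : Option Nat :=
  match cc with
  | [] => some pos
  | c :: cc' => if nxt cs c (pos + 1) < cs.length then gEnd cs cc' (nxt cs c (pos + 1)) else none

-- the common functional specification: sum over the starts s ∈ [i, n) with cs[s] = c0
-- of w^(e-s+1), e the greedy completion end of the tail cc after s.
def specSum (cs : List Char) (c0 : Char) (cc : List Char) (w : Int) (i : Nat) : Int :=
  if h : i < cs.length then
    (if cs[i] = c0 then (match gEnd cs cc i with | some e => w ^ (e - i + 1) | none => 0) else 0)
      + specSum cs c0 cc w (i + 1)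
  else 0
termination_by cs.length - i

theorem nxt_le (cs : List Char) (c : Char) (p : Nat) : nxt cs c p ≤ cs.length := by
  fun_induction nxt with
  | case1 p h hc => omega
  | case2 p h hc ih => exact ih
  | case3 p h => omega

theorem le_nxt (cs : List Char) (c : Char) (p : Nat) : min p cs.length ≤ nxt cs c p := by
  fun_induction nxt with
  | case1 p h hc => omega
  | case2 p h hc ih => omega
  | case3 p h => omega

theorem nxt_mono (cs : List Char) (c : Char) {p q : Nat} (h : p ≤ q) :
    nxt cs c p ≤ nxt cs c q := by
  fun_induction nxt cs c p generalizing q with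
  | case1 p h hc =>
    have := le_nxt cs c q
    have := nxt_le cs c q
    omega
  | case2 p hplt hc ih =>
    rcases Nat.eq_or_lt_of_le h with rfl | hlt
    · conv_rhs => rw [nxt]
      rw [dif_pos hplt, if_neg hc]
    · exact ih hlt
  | case3 p h =>
    have hq : ¬ q < cs.length := by omega
    rw [nxt]; simp [hq]

theorem gEnd_ge (cs : List Char) (cc : List Char) (pos e : Nat)
    (h : gEnd cs cc pos = some e) : pos ≤ e := by
  induction cc generalizing pos e with
  | nil => simp [gEnd] at h; omega
  | cons c cc' ih =>
    rw [gEnd] at h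
    split at h
    · rename_i hq
      have h1 := ih _ _ h
      have h2 := le_nxt cs c (pos + 1)
      omega
    · exact absurd h (by simp)

theorem gEnd_none_mono (cs : List Char) (cc : List Char) {pos q : Nat} (hpq : pos ≤ q)
    (h : gEnd cs cc pos = none) : gEnd cs cc q = none := by
  induction cc generalizing pos q with
  | nil => simp [gEnd] at h
  | cons c cc' ih =>
    rw [gEnd] at h ⊢
    have hm : nxt cs c (pos + 1) ≤ nxt cs c (q + 1) := nxt_mono cs c (by omega)
    have hle := nxt_le cs c (q + 1)
    split at h
    · rename_i hq
      split
      · exact ih hm h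
      · rfl
    · rename_i hq
      have : ¬ nxt cs c (q + 1) < cs.length := by omega
      simp [this]

theorem inner_eq (cs ss : List Char) (w : Int) (start : Nat) (acc : Int) (i j : Nat)
    (hi : 1 ≤ i) (hj1 : 1 ≤ j) (hj : j < ss.length) :
    innerA cs ss w start acc i j
      = (gEnd cs (ss.drop j) (i - 1)).map (fun e => acc + w ^ (e + 1 - start + 1)) := by
  have hgetD : ∀ {k : Nat} (hk : k < ss.length), ss.getD k ' ' = ss[k] := by
    intro k hk; exact List.getD_eq_getElem ss ' ' hk
  have main : ∀ (fuel i j : Nat), cs.length - i ≤ fuel → 1 ≤ i → 1 ≤ j → j < ss.length →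
      innerA cs ss w start acc i j
        = (gEnd cs (ss.drop j) (i - 1)).map (fun e => acc + w ^ (e + 1 - start + 1)) := by
    intro fuel
    induction fuel with
    | zero =>
      intro i j hf hi hj1 hj
      have hin : ¬ i < cs.length := by omega
      rw [innerA, dif_neg hin]
      rw [List.drop_eq_getElem_cons hj, gEnd]
      have h1 : i - 1 + 1 = i := by omega
      rw [h1, nxt, dif_neg hin]
      simp
    | succ f ihf =>
      intro i j hf hi hj1 hj
      rw [innerA]
      by_cases hin : i < cs.length
      · rw [dif_pos hin]
        by_cases hc : cs[i] = ss.getD j ' '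
        · rw [if_pos hc]
          by_cases hl : j = ss.length - 1
          · rw [if_pos hl]
            have hdrop1 : ss.drop (j + 1) = [] := by
              apply List.drop_eq_nil_of_le; omega
            rw [List.drop_eq_getElem_cons hj, hdrop1, gEnd]
            have h1 : i - 1 + 1 = i := by omega
            have hnxt : nxt cs ss[j] i = i := by
              rw [nxt, dif_pos hin, if_pos (by rw [← hgetD hj]; exact hc)]
            rw [h1, hnxt, if_pos hin]
            simp [gEnd]
          · rw [if_neg hl]
            have hj' : j + 1 < ss.length := by omega
            rw [ihf (i + 1) (j + 1) (by omega) (by omega) (by omega) hj']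
            rw [List.drop_eq_getElem_cons hj, gEnd]
            have h1 : i - 1 + 1 = i := by omega
            have h2 : i + 1 - 1 = i := by omega
            have hnxt : nxt cs ss[j] i = i := by
              rw [nxt, dif_pos hin, if_pos (by rw [← hgetD hj]; exact hc)]
            rw [h1, h2, hnxt, if_pos hin]
        · rw [if_neg hc]
          rw [ihf (i + 1) j (by omega) (by omega) hj1 hj]
          rw [List.drop_eq_getElem_cons hj]
          simp only [gEnd]
          have h1 : i - 1 + 1 = i := by omega
          have h2 : i + 1 - 1 = i := by omega
          have hnxt : nxt cs ss[j] i = nxt cs ss[j] (i + 1) := by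
            rw [nxt, dif_pos hin, if_neg (by rw [← hgetD hj]; exact hc)]
          rw [h1, h2, hnxt]
      · rw [dif_neg hin]
        rw [List.drop_eq_getElem_cons hj, gEnd]
        have h1 : i - 1 + 1 = i := by omega
        rw [h1, nxt, dif_neg hin]
        simp
  exact main (cs.length - i) i j (le_refl _) hi hj1 hj

theorem specSum_zero (cs : List Char) (c0 : Char) (cc : List Char) (w : Int) (i : Nat)
    (h : ∀ s, i ≤ s → gEnd cs cc s = none) : specSum cs c0 cc w i = 0 := by
  fun_induction specSum with
  | case1 i hi ih =>
    rw [h i (le_refl i)]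
    rw [ih (fun s hs => h s (by omega))]
    simp
  | case2 i hi => rfl

theorem outer_eq (cs ss : List Char) (w : Int) (acc : Int) (i : Nat) (h2 : 2 ≤ ss.length) :
    outerA cs ss w acc i = acc + specSum cs (ss.getD 0 ' ') (ss.drop 1) w i := by
  have main : ∀ (fuel i : Nat) (acc : Int), cs.length - i ≤ fuel →
      outerA cs ss w acc i = acc + specSum cs (ss.getD 0 ' ') (ss.drop 1) w i := by
    intro fuel
    induction fuel with
    | zero =>
      intro i acc hf
      have hin : ¬ i < cs.length := by omega
      rw [outerA, dif_neg hin, specSum, dif_neg hin]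
      ring
    | succ f ihf =>
      intro i acc hf
      rw [outerA]
      by_cases hin : i < cs.length
      · rw [dif_pos hin]
        by_cases hc : cs[i] = ss.getD 0 ' '
        · rw [if_pos hc]
          have heq := inner_eq cs ss w (i + 1) acc (i + 1) 1 (by omega) (le_refl 1) (by omega)
          have h11 : i + 1 - 1 = i := by omega
          rw [h11] at heq
          cases hg : gEnd cs (ss.drop 1) i with
          | none =>
            rw [hg] at heq
            simp only [Option.map_none] at heq
            rw [heq]
            rw [specSum, dif_pos hin, if_pos hc, hg]
            rw [specSum_zero cs _ _ w (i + 1)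
              (fun s hs => gEnd_none_mono cs _ (by omega : i ≤ s) hg)]
            simp
          | some e =>
            rw [hg] at heq
            simp only [Option.map_some] at heq
            rw [heq]
            have he : i ≤ e := gEnd_ge cs (ss.drop 1) i e hg
            have hexp : e + 1 - (i + 1) + 1 = e - i + 1 := by omega
            show outerA cs ss w (acc + w ^ (e + 1 - (i + 1) + 1)) (i + 1) = _
            conv_rhs => rw [specSum, dif_pos hin, if_pos hc, hg]
            rw [ihf (i + 1) _ (by omega), hexp]
            ring
        · rw [if_neg hc]
          conv_rhs => rw [specSum, dif_pos hin, if_neg hc]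
          rw [ihf (i + 1) acc (by omega)]
          ring
      · rw [dif_neg hin]
        rw [specSum, dif_neg hin]
        ring
  exact main (cs.length - i) i acc (le_refl _)


-- ---- B-side: nxt characterisation ----

theorem nxt_eq_of (cs : List Char) (c : Char) (q k : Nat) (hq : q ≤ k) (hk : k < cs.length)
    (hc : cs[k] = c) (hmin : ∀ j (hj : j < cs.length), q ≤ j → j < k → cs[j] ≠ c) :
    nxt cs c q = k := by
  fun_induction nxt with
  | case1 q h hcq =>
    by_contra hne
    have hqk : q < k := by omega
    exact hmin q h (le_refl q) hqk hcq
  | case2 q h hcq ih =>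
    have hqk : q < k := by
      rcases Nat.eq_or_lt_of_le hq with rfl | h' 
      · exact absurd hc hcq
      · exact h'
    exact ih (by omega) (fun j hj h1 h2 => hmin j hj (by omega) h2)
  | case3 q h => omega

theorem nxt_eq_len_of (cs : List Char) (c : Char) (q : Nat)
    (h : ∀ j (hj : j < cs.length), q ≤ j → cs[j] ≠ c) : nxt cs c q = cs.length := by
  fun_induction nxt with
  | case1 q hq hcq => exact absurd hcq (h q hq (le_refl q))
  | case2 q hq hcq ih => exact ih (fun j hj h1 => h j hj (by omega))
  | case3 q hq => rfl

-- ---- B-side: the per-character position lists ----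

-- posFrom cs c i = the ascending list of positions ≥ i of c in cs (as Python ints)
def posFrom (cs : List Char) (c : Char) (i : Nat) : List Int :=
  if h : i < cs.length then
    (if cs[i] = c then ((i : Int) :: posFrom cs c (i + 1)) else posFrom cs c (i + 1))
  else []
termination_by cs.length - i

theorem posFrom_mem (cs : List Char) (c : Char) (i : Nat) :
    ∀ x ∈ posFrom cs c i, ∃ j : Nat, x = (j : Int) ∧ i ≤ j ∧ ∃ (hj : j < cs.length), cs[j] = c := by
  fun_induction posFrom with
  | case1 i h hc ih =>
    intro x hx
    rcases List.mem_cons.mp hx with rfl | hx'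
    · exact ⟨i, rfl, le_refl i, h, hc⟩
    · obtain ⟨j, rfl, hij, hj, hcj⟩ := ih x hx'
      exact ⟨j, rfl, by omega, hj, hcj⟩
  | case2 i h hc ih =>
    intro x hx
    obtain ⟨j, rfl, hij, hj, hcj⟩ := ih x hx
    exact ⟨j, rfl, by omega, hj, hcj⟩
  | case3 i h => intro x hx; cases hx

theorem posFrom_mem_of (cs : List Char) (c : Char) (i : Nat) :
    ∀ j (hj : j < cs.length), i ≤ j → cs[j] = c → (j : Int) ∈ posFrom cs c i := by
  fun_induction posFrom with
  | case1 i h hc ih =>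
    intro j hj hij hcj
    by_cases hje : j = i
    · subst hje; exact List.mem_cons_self
    · exact List.mem_cons_of_mem _ (ih j hj (by omega) hcj)
  | case2 i h hc ih =>
    intro j hj hij hcj
    have hje : ¬ j = i := by intro he; subst he; exact hc hcj
    exact ih j hj (by omega) hcj
  | case3 i h =>
    intro j hj hij hcj
    omega
  
theorem posFrom_sorted (cs : List Char) (c : Char) (i : Nat) :
    (posFrom cs c i).Pairwise (· < ·) := by
  fun_induction posFrom with
  | case1 i h hc ih =>
    refine List.Pairwise.cons ?_ ih
    intro x hx
    obtain ⟨j, rfl, hij, hj, hcj⟩ := posFrom_mem cs c (i + 1) x hx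
    exact_mod_cast by omega
  | case2 i h hc ih => exact ih
  | case3 i h => exact List.Pairwise.nil

-- ---- B-side: the binary search ----

theorem firstGreater_spec (lst : List Int) (x : Int) (hsorted : lst.Pairwise (· < ·)) :
    ∀ (fuel lo hi : Nat), hi - lo ≤ fuel → lo ≤ hi → hi ≤ lst.length →
    (∀ i (h : i < lst.length), i < lo → lst[i] ≤ x) →
    (∀ i (h : i < lst.length), hi ≤ i → x < lst[i]) →
    lo ≤ firstGreater lst x lo hi ∧ firstGreater lst x lo hi ≤ hi ∧
    (∀ i (h : i < lst.length), i < firstGreater lst x lo hi → lst[i] ≤ x) ∧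
    (∀ i (h : i < lst.length), firstGreater lst x lo hi ≤ i → x < lst[i]) := by
  have hs := List.pairwise_iff_getElem.mp hsorted
  intro fuel
  induction fuel with
  | zero =>
    intro lo hi hf hlohi hhi hbelow habove
    have hlh : ¬ lo < hi := by omega
    rw [firstGreater, dif_neg hlh]
    exact ⟨le_refl lo, hlohi, hbelow, fun i h hle => habove i h (by omega)⟩
  | succ f ihf =>
    intro lo hi hf hlohi hhi hbelow habove
    rw [firstGreater]
    by_cases hlh : lo < hi
    · rw [dif_pos hlh]
      have hmidlt : (lo + hi) / 2 < lst.length := by omega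
      rw [List.getD_eq_getElem lst 0 hmidlt]
      by_cases hcmp : lst[(lo + hi) / 2] ≤ x
      · rw [if_pos hcmp]
        refine (ihf ((lo + hi) / 2 + 1) hi (by omega) (by omega) hhi ?_ habove).imp
          (by omega) (fun h => h)
        intro i h hi'
        by_cases hie : i = (lo + hi) / 2
        · subst hie; exact hcmp
        · exact le_trans (le_of_lt (hs i ((lo + hi) / 2) h hmidlt (by omega))) hcmp
      · rw [if_neg hcmp]
        refine (ihf lo ((lo + hi) / 2) (by omega) (by omega) (by omega) hbelow ?_).imp
          (fun h => h) (fun h => ⟨by omega, h.2⟩)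
        intro i h hi'
        rcases Nat.eq_or_lt_of_le hi' with rfl | hlt
        · omega
        · rcases Nat.eq_or_lt_of_le hi' with he | hlt'
          · omega
          · exact lt_trans (lt_of_not_ge hcmp) (hs ((lo + hi) / 2) i hmidlt h hlt')
    · rw [dif_neg hlh]
      exact ⟨le_refl lo, hlohi, hbelow, fun i h hle => habove i h (by omega)⟩

-- the binary-search jump over posFrom computes nxt
theorem jump_eq (cs : List Char) (c : Char) (p : Nat) :
    (firstGreater (posFrom cs c 0) (p : Int) 0 (posFrom cs c 0).length = (posFrom cs c 0).length
        → nxt cs c (p + 1) = cs.length) ∧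
    (firstGreater (posFrom cs c 0) (p : Int) 0 (posFrom cs c 0).length < (posFrom cs c 0).length
        → nxt cs c (p + 1) < cs.length ∧
          (posFrom cs c 0).getD
            (firstGreater (posFrom cs c 0) (p : Int) 0 (posFrom cs c 0).length) 0
            = ((nxt cs c (p + 1) : Nat) : Int)) := by
  have hspec := firstGreater_spec (posFrom cs c 0) (p : Int) (posFrom_sorted cs c 0)
    (posFrom cs c 0).length 0 (posFrom cs c 0).length (by omega) (by omega) (le_refl _)
    (fun i h hi => by omega) (fun i h hi => by omega)
  obtain ⟨h0, hle, hbelow, habove⟩ := hspec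
  have hs := List.pairwise_iff_getElem.mp (posFrom_sorted cs c 0)
  constructor
  · intro hr
    apply nxt_eq_len_of
    intro j hj hqj hcj
    have hmem := posFrom_mem_of cs c 0 j hj (by omega) hcj
    obtain ⟨t, ht, hPt⟩ := List.mem_iff_getElem.mp hmem
    have := hbelow t ht (by omega)
    rw [hPt] at this
    have : j ≤ p := by exact_mod_cast this
    omega
  · intro hr
    have hPr := List.getElem_mem hr
    obtain ⟨k, hk, h0k, hklt, hck⟩ := posFrom_mem cs c 0 _ hPr
    have hgt := habove _ hr (le_refl _)
    rw [hk] at hgt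
    have hpk : p + 1 ≤ k := by exact_mod_cast by omega
    have hnxt : nxt cs c (p + 1) = k := by
      apply nxt_eq_of cs c (p + 1) k hpk hklt hck
      intro j hj h1 h2 hcj
      have hmem := posFrom_mem_of cs c 0 j hj (by omega) hcj
      obtain ⟨t, ht, hPt⟩ := List.mem_iff_getElem.mp hmem
      by_cases htr : t < firstGreater (posFrom cs c 0) (p : Int) 0 (posFrom cs c 0).length
      · have := hbelow t ht htr
        rw [hPt] at this
        have : j ≤ p := by exact_mod_cast this
        omega
      · rcases Nat.eq_or_lt_of_le (Nat.le_of_not_lt htr) with he | hlt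
        · subst he
          have hjk : (j : Int) = (k : Int) := hPt.symm.trans hk
          have : j = k := by exact_mod_cast hjk
          omega
        · have := hs _ t hr ht hlt
          rw [hPt, hk] at this
          have : k < j := by exact_mod_cast this
          omega
    constructor
    · omega
    · rw [List.getD_eq_getElem _ _ hr, hk, hnxt]

-- ---- B-side: the occ dict ----

theorem getD_occ_fold (l : List (Int × Char)) (d : PySem.Dict Char (List Int)) (c : Char) :
    (l.foldl (fun d p => d.modify p.2 [] (· ++ [p.1])) d).getD c []
      = d.getD c [] ++ (l.filter (fun p => p.2 == c)).map (·.1) := by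
  induction l generalizing d with
  | nil => simp
  | cons p l ih =>
    rw [List.foldl_cons, ih, List.filter_cons]
    by_cases hc : p.2 = c
    · rw [PySem.Dict.getD_modify, if_pos hc.symm]
      simp [hc]
    · rw [PySem.Dict.getD_modify, if_neg (fun he => hc he.symm)]
      simp [hc]

theorem enum_posFrom (cs : List Char) (c : Char) :
    ∀ (l : List Char) (k : Nat), l = cs.drop k →
      ((PySem.List.enumerate l (k : Int)).filter (fun p => p.2 == c)).map (·.1)
        = posFrom cs c k := by
  intro l
  induction l with
  | nil =>
    intro k hk
    have hkn : cs.length ≤ k := by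
      have := congrArg List.length hk
      simp [List.length_drop] at this
      omega
    rw [PySem.List.enumerate_nil, posFrom, dif_neg (by omega)]
    rfl
  | cons ch rest ih =>
    intro k hk
    have hkn : k < cs.length := by
      have := congrArg List.length hk
      simp [List.length_drop] at this
      omega
    have hcsk : cs[k] = ch := by
      have h1 : cs[k + 0]? = some ch := by rw [← List.getElem?_drop, ← hk]; rfl
      have h2 : cs[k]? = some ch := by simpa using h1
      rw [List.getElem?_eq_getElem hkn] at h2
      exact Option.some.inj h2
    have hrest : rest = cs.drop (k + 1) := by
      have := congrArg (List.drop 1) hk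
      simpa using this
    rw [PySem.List.enumerate_cons]
    have hcast : ((k : Int) + 1) = ((k + 1 : Nat) : Int) := by push_cast; ring
    rw [hcast, List.filter_cons]
    rw [posFrom, dif_pos hkn, hcsk]
    by_cases hcc : ch = c
    · rw [if_pos hcc]
      simp only [hcc, beq_self_eq_true, if_pos]
      rw [List.map_cons, ih (k + 1) hrest]
    · rw [if_neg hcc]
      simp only [beq_eq_false_iff_ne, ne_eq]
      rw [if_neg (by simpa using hcc)]
      exact ih (k + 1) hrest

-- ---- B-side: the two folds of find_alt ----

theorem innerB_stuck (occD : PySem.Dict Char (List Int)) (cc : List Char) (pq : Int × Bool)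
    (h : pq.2 = false) :
    cc.foldl
      (fun (pq : Int × Bool) c =>
        if pq.2 then
          if firstGreater (occD.getD c []) pq.1 0 (occD.getD c []).length
              = (occD.getD c []).length then (pq.1, false)
          else ((occD.getD c []).getD
              (firstGreater (occD.getD c []) pq.1 0 (occD.getD c []).length) 0, true)
        else pq) pq = pq := by
  induction cc with
  | nil => rfl
  | cons c cc' ih =>
    rw [List.foldl_cons, if_neg (show ¬ pq.2 = true by rw [h]; exact Bool.false_ne_true)]
    exact ih

theorem innerB (cs : List Char) (occD : PySem.Dict Char (List Int))
    (hocc : ∀ c, occD.getD c [] = posFrom cs c 0) (cc : List Char) :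
    ∀ (p : Nat),
      (gEnd cs cc p = none →
        (cc.foldl
          (fun (pq : Int × Bool) c =>
            if pq.2 then
              if firstGreater (occD.getD c []) pq.1 0 (occD.getD c []).length
                  = (occD.getD c []).length then (pq.1, false)
              else ((occD.getD c []).getD
                  (firstGreater (occD.getD c []) pq.1 0 (occD.getD c []).length) 0, true)
            else pq) ((p : Int), true)).2 = false) ∧
      (∀ e, gEnd cs cc p = some e →
        cc.foldl
          (fun (pq : Int × Bool) c =>
            if pq.2 then
              if firstGreater (occD.getD c []) pq.1 0 (occD.getD c []).length
                  = (occD.getD c []).length then (pq.1, false)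
              else ((occD.getD c []).getD
                  (firstGreater (occD.getD c []) pq.1 0 (occD.getD c []).length) 0, true)
            else pq) ((p : Int), true) = ((e : Int), true)) := by
  induction cc with
  | nil =>
    intro p
    constructor
    · intro h; exact absurd h (by simp [gEnd])
    · intro e he
      have : p = e := by simpa [gEnd] using he
      subst this
      rfl
  | cons c cc' ih =>
    intro p
    have hj := jump_eq cs c p
    rw [List.foldl_cons, if_pos (rfl : (((p : Int), true) : Int × Bool).2 = true)]
    have h1 : (((p : Int), true) : Int × Bool).1 = (p : Int) := rfl
    rw [h1, hocc c]
    by_cases hr : firstGreater (posFrom cs c 0) (p : Int) 0 (posFrom cs c 0).length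
        = (posFrom cs c 0).length
    · rw [if_pos hr, innerB_stuck occD cc' _ rfl]
      have hnxt := hj.1 hr
      constructor
      · intro _; rfl
      · intro e he
        rw [gEnd, if_neg (by omega)] at he
        exact absurd he (by simp)
    · rw [if_neg hr]
      have hlt : firstGreater (posFrom cs c 0) (p : Int) 0 (posFrom cs c 0).length
          < (posFrom cs c 0).length := by
        have hle := (firstGreater_spec (posFrom cs c 0) (p : Int) (posFrom_sorted cs c 0)
          (posFrom cs c 0).length 0 (posFrom cs c 0).length (by omega) (by omega) (le_refl _)
          (fun i h hi => by omega) (fun i h hi => by omega)).2.1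
        omega
      obtain ⟨hnlt, hgetD⟩ := hj.2 hlt
      rw [hgetD]
      constructor
      · intro hnone
        rw [gEnd, if_pos hnlt] at hnone
        exact (ih (nxt cs c (p + 1))).1 hnone
      · intro e he
        rw [gEnd, if_pos hnlt] at he
        exact (ih (nxt cs c (p + 1))).2 e he
theorem outerB_stuck (ss : List Char) (w : Int) (occD : PySem.Dict Char (List Int))
    (l : List Int) (st : Int × Bool) (h : st.2 = false) :
    l.foldl
      (fun (st : Int × Bool) s =>
        if st.2 then
          if ((ss.drop 1).foldl
              (fun (pq : Int × Bool) c =>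
                if pq.2 then
                  if firstGreater (occD.getD c []) pq.1 0 (occD.getD c []).length
                      = (occD.getD c []).length then (pq.1, false)
                  else ((occD.getD c []).getD
                      (firstGreater (occD.getD c []) pq.1 0 (occD.getD c []).length) 0, true)
                else pq) (s, true)).2
          then (st.1 + w ^ (((ss.drop 1).foldl
              (fun (pq : Int × Bool) c =>
                if pq.2 then
                  if firstGreater (occD.getD c []) pq.1 0 (occD.getD c []).length
                      = (occD.getD c []).length then (pq.1, false)
                  else ((occD.getD c []).getD
                      (firstGreater (occD.getD c []) pq.1 0 (occD.getD c []).length) 0, true)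
                else pq) (s, true)).1 - s + 1).toNat, true)
          else (st.1, false)
        else st) st = st := by
  induction l with
  | nil => rfl
  | cons v l ih =>
    rw [List.foldl_cons, if_neg (show ¬ st.2 = true by rw [h]; exact Bool.false_ne_true)]
    exact ih

theorem outerB (cs ss : List Char) (w : Int) (occD : PySem.Dict Char (List Int))
    (hocc : ∀ c, occD.getD c [] = posFrom cs c 0) :
    ∀ (fuel i : Nat) (acc : Int), cs.length - i ≤ fuel →
    ((posFrom cs (ss.getD 0 ' ') i).foldl
      (fun (st : Int × Bool) s =>
        if st.2 then
          if ((ss.drop 1).foldl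
              (fun (pq : Int × Bool) c =>
                if pq.2 then
                  if firstGreater (occD.getD c []) pq.1 0 (occD.getD c []).length
                      = (occD.getD c []).length then (pq.1, false)
                  else ((occD.getD c []).getD
                      (firstGreater (occD.getD c []) pq.1 0 (occD.getD c []).length) 0, true)
                else pq) (s, true)).2
          then (st.1 + w ^ (((ss.drop 1).foldl
              (fun (pq : Int × Bool) c =>
                if pq.2 then
                  if firstGreater (occD.getD c []) pq.1 0 (occD.getD c []).length
                      = (occD.getD c []).length then (pq.1, false)
                  else ((occD.getD c []).getD
                      (firstGreater (occD.getD c []) pq.1 0 (occD.getD c []).length) 0, true)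
                else pq) (s, true)).1 - s + 1).toNat, true)
          else (st.1, false)
        else st) (acc, true)).1
      = acc + specSum cs (ss.getD 0 ' ') (ss.drop 1) w i := by
  intro fuel
  induction fuel with
  | zero =>
    intro i acc hf
    rw [posFrom, dif_neg (by omega : ¬ i < cs.length)]
    rw [specSum, dif_neg (by omega : ¬ i < cs.length)]
    simp
  | succ f ihf =>
    intro i acc hf
    by_cases hin : i < cs.length
    · rw [posFrom, dif_pos hin]
      conv_rhs => rw [specSum, dif_pos hin]
      by_cases hc : cs[i] = ss.getD 0 ' '
      · rw [if_pos hc, if_pos hc, List.foldl_cons,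
          if_pos (rfl : ((acc, true) : Int × Bool).2 = true)]
        have hI := innerB cs occD hocc (ss.drop 1) i
        cases hg : gEnd cs (ss.drop 1) i with
        | some e =>
          rw [hI.2 e hg]
          rw [if_pos (rfl : (((e : Int), true) : Int × Bool).2 = true)]
          have hacc1 : ((acc, true) : Int × Bool).1 = acc := rfl
          have he1 : ((((e : Int), true)) : Int × Bool).1 = (e : Int) := rfl
          rw [hacc1, he1]
          have hei : i ≤ e := gEnd_ge cs (ss.drop 1) i e hg
          have hexp : ((e : Int) - (i : Int) + 1).toNat = e - i + 1 := by omega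
          rw [hexp, ihf (i + 1) _ (by omega)]
          ring
        | none =>
          rw [hI.1 hg]
          rw [if_neg (by exact Bool.false_ne_true)]
          have hacc1 : ((acc, true) : Int × Bool).1 = acc := rfl
          rw [hacc1, outerB_stuck ss w occD _ _ rfl]
          rw [specSum_zero cs _ _ w (i + 1)
            (fun s hs => gEnd_none_mono cs _ (by omega : i ≤ s) hg)]
          simp
      · rw [if_neg hc, if_neg hc]
        rw [ihf (i + 1) acc (by omega)]
        simp
    · rw [posFrom, dif_neg hin]
      rw [specSum, dif_neg hin]
      simp

theorem find_alt_eq (main sub : String) (w : Int) (hsub : ¬ sub = "") :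
    find_alt main sub w
      = specSum main.toList (sub.toList.getD 0 ' ') (sub.toList.drop 1) w 0 := by
  unfold find_alt
  rw [if_neg hsub]
  have hocc : ∀ c, ((PySem.List.enumerate main.toList).foldl
      (fun d p => d.modify p.2 [] (· ++ [p.1])) PySem.Dict.empty).getD c []
      = posFrom main.toList c 0 := by
    intro c
    rw [getD_occ_fold]
    rw [PySem.Dict.getD_empty]
    exact (List.nil_append _).trans (enum_posFrom main.toList c main.toList 0 rfl)
  show ((((PySem.List.enumerate main.toList).foldl
      (fun d p => d.modify p.2 [] (· ++ [p.1]))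
      PySem.Dict.empty).getD (sub.toList.getD 0 ' ') []).foldl _ ((0 : Int), true)).1 = _
  rw [hocc (sub.toList.getD 0 ' ')]
  exact (outerB main.toList sub.toList w _ hocc main.toList.length 0 0 (by omega)).trans
    (zero_add _)

-- ---- the length-1 pattern corner ----

theorem outerA_len1 (cs ss : List Char) (w : Int) (h1 : ss.length = 1)
    (hno : ∀ p (hp : p < cs.length - 1), cs[p] ≠ ss.getD 0 ' ') (acc : Int) (i : Nat) :
    outerA cs ss w acc i = acc := by
  have main : ∀ (fuel i : Nat), cs.length - i ≤ fuel → outerA cs ss w acc i = acc := by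
    intro fuel
    induction fuel with
    | zero =>
      intro i hf
      rw [outerA, dif_neg (by omega : ¬ i < cs.length)]
    | succ f ihf =>
      intro i hf
      rw [outerA]
      by_cases hin : i < cs.length
      · rw [dif_pos hin]
        by_cases hc : cs[i] = ss.getD 0 ' '
        · rw [if_pos hc]
          have hi : i = cs.length - 1 := by
            by_contra hne
            exact hno i (by omega) hc
          have hnone : innerA cs ss w (i + 1) acc (i + 1) 1 = none := by
            rw [innerA, dif_neg (by omega : ¬ i + 1 < cs.length)]
          rw [hnone]
        · rw [if_neg hc]
          exact ihf (i + 1) (by omega)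
      · rw [dif_neg hin]
  exact main (cs.length - i) i (le_refl _)

theorem specSum_len1_zero (cs : List Char) (c0 : Char) (w : Int)
    (hno : ∀ p (hp : p < cs.length - 1), cs[p] ≠ c0)
    (hD : ¬ cs.getLast? = some c0 ∨ w = 0) (i : Nat) :
    specSum cs c0 [] w i = 0 := by
  have main : ∀ (fuel i : Nat), cs.length - i ≤ fuel → specSum cs c0 [] w i = 0 := by
    intro fuel
    induction fuel with
    | zero =>
      intro i hf
      rw [specSum, dif_neg (by omega : ¬ i < cs.length)]
    | succ f ihf =>
      intro i hf
      rw [specSum]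
      by_cases hin : i < cs.length
      · rw [dif_pos hin, ihf (i + 1) (by omega)]
        have hcontrib : (if cs[i] = c0 then (match gEnd cs [] i with
            | some e => w ^ (e - i + 1) | none => 0) else 0) = 0 := by
          by_cases hc : cs[i] = c0
          · have hi1 : i = cs.length - 1 := by
              by_contra hne
              exact hno i (by omega) hc
            have hlast : cs.getLast? = some c0 := by
              rw [List.getLast?_eq_getElem?]
              rw [← hi1, List.getElem?_eq_getElem hin, hc]
            rcases hD with hD | hD
            · exact absurd hlast hD
            · simp [gEnd, hD, hc]
          · rw [if_neg hc]
        rw [hcontrib]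
        simp
      · rw [dif_neg hin]
  exact main (cs.length - i) i (le_refl _)

theorem specSum_len1_w (cs : List Char) (c0 : Char) (w : Int)
    (hno : ∀ p (hp : p < cs.length - 1), cs[p] ≠ c0)
    (hlast : cs.getLast? = some c0) (hne : cs ≠ []) :
    ∀ i, i ≤ cs.length - 1 → specSum cs c0 [] w i = w := by
  have hn : 1 ≤ cs.length := by
    cases cs
    · exact absurd rfl hne
    · simp
  have hc0 : cs[cs.length - 1]'(by omega) = c0 := by
    rw [List.getLast?_eq_getElem?] at hlast
    rw [List.getElem?_eq_getElem (by omega : cs.length - 1 < cs.length)] at hlast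
    exact Option.some.inj hlast
  have main : ∀ (fuel i : Nat), cs.length - i ≤ fuel → i ≤ cs.length - 1 →
      specSum cs c0 [] w i = w := by
    intro fuel
    induction fuel with
    | zero =>
      intro i hf hi
      exfalso
      omega
    | succ f ihf =>
      intro i hf hi
      have hilt : i < cs.length := by omega
      rw [specSum, dif_pos hilt]
      by_cases hieq : i = cs.length - 1
      · subst hieq
        have hnil : specSum cs c0 [] w (cs.length - 1 + 1) = 0 := by
          rw [specSum, dif_neg (by omega : ¬ cs.length - 1 + 1 < cs.length)]
        rw [hnil, if_pos hc0]
        simp [gEnd]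
      · rw [if_neg (hno i (by omega))]
        rw [ihf (i + 1) (by omega) (by omega)]
        simp
  intro i hi
  exact main (cs.length - i) i (le_refl _) hi

theorem pre_len1_no (main sub : String) (weight : Int) (hpre : Pre_find main sub weight)
    (h1 : sub.toList.length = 1) :
    ∀ p (hp : p < main.toList.length - 1), main.toList[p] ≠ sub.toList.getD 0 ' ' := by
  rcases hpre with h2 | ⟨hs, _⟩ | ⟨_, hall⟩
  · omega
  · rw [hs] at h1; simp at h1
  · intro p hp hceq
    have hpd : p < main.toList.dropLast.length := by rw [List.length_dropLast]; omega
    have hmem : main.toList[p] ∈ main.toList.dropLast := by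
      have : main.toList.dropLast[p] = main.toList[p] := List.getElem_dropLast ..
      rw [← this]
      exact List.getElem_mem hpd
    obtain ⟨a, ha⟩ := List.length_eq_one_iff.mp h1
    have hnc := List.all_eq_true.mp hall _ hmem
    rw [ha] at hnc hceq
    simp at hnc hceq
    exact hnc (by rw [hceq])

theorem sub_ne_empty_of_len (sub : String) {k : Nat} (hk : 1 ≤ k) (h : k ≤ sub.toList.length) :
    ¬ sub = "" := by
  intro hs
  rw [hs] at h
  simp at h
  omega

theorem find_spec : Claim_unchanged_find := by
  intro main sub w _ hpre hnd
  by_cases h2 : 2 ≤ sub.toList.length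
  · have hsub := sub_ne_empty_of_len sub (by omega) h2
    rw [find_alt_eq main sub w hsub]
    show outerA main.toList sub.toList w 0 0 = _
    rw [outer_eq _ _ _ _ _ h2]
    simp
  · by_cases h1 : sub.toList.length = 1
    · have hno := pre_len1_no main sub w hpre h1
      have hsub := sub_ne_empty_of_len sub (le_refl 1) (by omega)
      have hfind : find main sub w = 0 :=
        outerA_len1 main.toList sub.toList w h1 hno 0 0
      rw [hfind, find_alt_eq main sub w hsub]
      have hdrop : sub.toList.drop 1 = [] := List.drop_eq_nil_of_le (by omega)
      rw [hdrop]
      refine (specSum_len1_zero main.toList (sub.toList.getD 0 ' ') w hno ?_ 0).symm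
      have hD' : ¬ (main.toList.getLast? = sub.toList.head? ∧ w ≠ 0) := by
        intro hcon
        exact hnd ⟨h1, hcon.1, hcon.2⟩
      obtain ⟨a, ha⟩ := List.length_eq_one_iff.mp h1
      rw [ha]
      by_cases hw : w = 0
      · right; exact hw
      · left
        intro hl
        apply hD'
        rw [ha]
        exact ⟨by simpa using hl, hw⟩
    · have h0 : sub.toList.length = 0 := by omega
      rcases hpre with hp | ⟨hs, hm⟩ | ⟨hp, _⟩
      · omega
      · subst hs; subst hm
        show outerA [] [] w 0 0 = find_alt "" "" w
        rw [outerA, find_alt]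
        simp
      · omega

set_option maxRecDepth 100000 in
theorem find_changed : Claim_changed_find := by
  unfold Claim_changed_find
  refine ⟨by decide, by decide, by decide, ?_, by decide, by decide⟩
  show find "a" "a" 2 = (0, 2).1
  have hs : "a".toList = ['a'] := rfl
  have hinner : innerA ['a'] ['a'] 2 1 0 1 1 = none := by
    rw [innerA]; norm_num
  show outerA "a".toList "a".toList 2 0 0 = 0
  rw [hs, outerA]
  norm_num [hinner]

theorem find_tight : Claim_exact_find := by
  intro main sub w _ hpre hD
  obtain ⟨h1, hlast, hw⟩ := hD
  obtain ⟨a, ha⟩ := List.length_eq_one_iff.mp h1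
  have hlast' : main.toList.getLast? = some a := by rw [ha] at hlast; simpa using hlast
  have hmne : main.toList ≠ [] := by
    intro hnil
    rw [hnil] at hlast'
    simp at hlast'
  have hno := pre_len1_no main sub w hpre h1
  have hfind : find main sub w = 0 :=
    outerA_len1 main.toList sub.toList w h1 hno 0 0
  have hsub := sub_ne_empty_of_len sub (le_refl 1) (by omega)
  have hga : sub.toList.getD 0 ' ' = a := by rw [ha]; rfl
  have halt : find_alt main sub w = w := by
    rw [find_alt_eq main sub w hsub]
    rw [List.drop_eq_nil_of_le (by omega : sub.toList.length ≤ 1)]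
    rw [hga]
    exact specSum_len1_w main.toList a w (by rw [← hga]; exact hno) hlast' hmne 0 (by omega)
  rw [hfind, halt]
  exact fun h => hw h.symm
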